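-- pv_equiv track=rewrite | github.com/alessandrostefanone-polimi/ontology-req-pipeline | src/ontology_req_pipeline/ontology/agentic_kg_builder.py | add_ontology_header
-- ===== SOURCE A (Python) =====
-- def add_ontology_header(ttl_text: str, base: str) -> str:
--     """Normalize ordering: base, prefixes, body, ontology declaration."""
--     lines = [ln.strip() for ln in ttl_text.splitlines() if ln.strip()]
--     base_line = f"@base <{base}> ."
--     bases = [ln for ln in lines if ln.startswith("@base")]
--     prefixes = [ln for ln in lines if ln.startswith("@prefix")]
--     body = [ln for ln in lines if not (ln.startswith("@base") or ln.startswith("@prefix") or " a owl:Ontology" in ln)]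
--
--     # replace/ensure single base line
--     lines_out = [base_line]
--     # unique prefixes preserving order appearance
--     seen = set()
--     for ln in prefixes:
--         if ln not in seen:
--             lines_out.append(ln)
--             seen.add(ln)
--
--     lines_out.extend(body)
--
--     ontology_decl = f"<{base}> a owl:Ontology ."
--     if ontology_decl not in lines_out:
--         lines_out.append(ontology_decl)
--
--     return "\n".join(lines_out) + "\n"
-- ===== SOURCE B (Python) =====
-- def add_ontology_header(ttl_text: str, base: str) -> str:
--     """Normalize ordering: base, prefixes, body, ontology declaration."""
--     prefixes = []
--     body = []
--     for raw in reversed(ttl_text.splitlines()):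
--         ln = raw.strip()
--         if not ln or ln.startswith("@base"):
--             continue
--         if ln.startswith("@prefix"):
--             # keep this (earlier) occurrence, drop any later duplicates already collected
--             prefixes = [ln] + [p for p in prefixes if p != ln]
--         elif " a owl:Ontology" not in ln:
--             body.append(ln)
--     body.reverse()
--     lines_out = [f"@base <{base}> ."] + prefixes + body
--     ontology_decl = f"<{base}> a owl:Ontology ."
--     if ontology_decl not in lines_out:
--         lines_out.append(ontology_decl)
--     return "\n".join(lines_out) + "\n"
-- ===== Notes on version B (the rewrite author's own statement) =====
-- stated objective: alternative
-- what changed: B builds the output back-to-front: one reverse traversal of the lines, deduplicating prefixes by prepending each occurrence and filtering out later duplicates (no seen-set), and collecting the body reversed with a single final reversal, instead of A's forward filtering comprehensions plus a seen-set dedup loop.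
import Mathlib
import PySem

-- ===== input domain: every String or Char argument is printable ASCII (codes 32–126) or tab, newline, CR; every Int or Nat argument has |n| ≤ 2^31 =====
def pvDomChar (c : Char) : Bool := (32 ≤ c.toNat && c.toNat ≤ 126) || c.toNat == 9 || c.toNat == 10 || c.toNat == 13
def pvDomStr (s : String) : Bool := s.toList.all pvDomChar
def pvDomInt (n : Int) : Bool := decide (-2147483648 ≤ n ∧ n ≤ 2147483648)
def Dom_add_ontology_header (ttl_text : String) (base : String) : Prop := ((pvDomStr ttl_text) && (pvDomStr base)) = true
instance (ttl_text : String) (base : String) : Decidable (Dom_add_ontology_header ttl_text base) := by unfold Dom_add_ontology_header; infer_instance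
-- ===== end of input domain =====

-- B reorders TTL lines like A but back-to-front: one reverse traversal of the lines, prefix
-- dedup by prepend-and-filter instead of A's seen-set loop, body collected reversed and
-- flipped once (objective: alternative; same return value).

-- ===== PORT A =====
-- shared line predicates ("ln.startswith(...)", the body comprehension's condition)
def pvIsPrefix (ln : String) : Bool := PySem.Str.startswith ln "@prefix"
def pvIsBase (ln : String) : Bool := PySem.Str.startswith ln "@base"
def pvIsBody (ln : String) : Bool :=
  !(pvIsBase ln || pvIsPrefix ln || PySem.Str.isIn " a owl:Ontology" ln)

-- [ln.strip() for ln in ttl_text.splitlines() if ln.strip()]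
def pvLines (L : List String) : List String :=
  (L.filter (fun ln => !(PySem.Str.strip ln == ""))).map PySem.Str.strip

-- body of A's `for ln in prefixes: if ln not in seen: lines_out.append(ln); seen.add(ln)`
def pvDedupStep (st : List String × PySem.Set String) (ln : String) :
    List String × PySem.Set String :=
  if !(PySem.Set.contains st.2 ln) then (st.1 ++ [ln], PySem.Set.add st.2 ln) else st

def add_ontology_header (ttl_text : String) (base : String) : String :=
  let lines := pvLines (PySem.Str.splitlines ttl_text)
  let base_line := "@base <" ++ base ++ "> ."
  let _bases := lines.filter pvIsBase
  let prefixes := lines.filter pvIsPrefix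
  let body := lines.filter pvIsBody
  let st := prefixes.foldl pvDedupStep ([base_line], PySem.Set.empty)
  let lines_out := st.1 ++ body
  let ontology_decl := "<" ++ base ++ "> a owl:Ontology ."
  let lines_out := if lines_out.contains ontology_decl then lines_out
                   else lines_out ++ [ontology_decl]
  PySem.Str.join "\n" lines_out ++ "\n"

-- ===== PORT B =====
-- body of B's single reverse loop; state = (prefixes, body-in-reverse-order)
def pvRevStep (st : List String × List String) (raw : String) :
    List String × List String :=
  let ln := PySem.Str.strip raw
  if ln == "" then st
  else if pvIsBase ln then st
  else if pvIsPrefix ln then (ln :: st.1.filter (fun p => !(p == ln)), st.2)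
  else if PySem.Str.isIn " a owl:Ontology" ln then st
  else (st.1, st.2 ++ [ln])

def add_ontology_header_alt (ttl_text : String) (base : String) : String :=
  let st := ((PySem.Str.splitlines ttl_text).reverse).foldl pvRevStep ([], [])
  let lines_out := ("@base <" ++ base ++ "> .") :: st.1 ++ st.2.reverse
  let ontology_decl := "<" ++ base ++ "> a owl:Ontology ."
  let lines_out := if lines_out.contains ontology_decl then lines_out
                   else lines_out ++ [ontology_decl]
  PySem.Str.join "\n" lines_out ++ "\n"

-- ===== PRECONDITION & SPEC =====
def Spec_add_ontology_header (ttl_text : String) (base : String) (out : String) : Prop := out = add_ontology_header_alt ttl_text base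
instance (ttl_text : String) (base : String) (out : String) : Decidable (Spec_add_ontology_header ttl_text base out) := by unfold Spec_add_ontology_header; infer_instance

-- ===== CLAIM (what is proved, stated in full; the proofs are below) =====
def Claim_equal_add_ontology_header : Prop := ∀ (ttl_text : String) (base : String), Dom_add_ontology_header ttl_text base → Spec_add_ontology_header ttl_text base (add_ontology_header ttl_text base)

-- ===== LEMMAS AND PROOFS =====

def pvDf : List String → List String
  | [] => []
  | x :: xs => x :: (pvDf xs).filter (fun y => !(y == x))

theorem pvDedup_passive (M : List String) :
    ∀ (out : List String) (seen : PySem.Set String),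
      M.foldl pvDedupStep (out, seen)
        = (out ++ (M.foldl pvDedupStep ([], seen)).1, (M.foldl pvDedupStep ([], seen)).2) := by
  induction M with
  | nil => intro out seen; simp
  | cons ln M ih =>
    intro out seen
    by_cases hc : PySem.Set.contains seen ln = true
    · simp only [List.foldl_cons, pvDedupStep, hc, Bool.not_true, Bool.false_eq_true, if_false]
      exact ih out seen
    · simp only [List.foldl_cons, pvDedupStep, Bool.eq_false_iff.mpr hc, Bool.not_false, if_true,
        List.nil_append]
      rw [ih (out ++ [ln]), ih [ln]]
      simp

theorem pvContains_add (s : PySem.Set String) (x y : String) :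
    PySem.Set.contains (PySem.Set.add s x) y = (PySem.Set.contains s y || y == x) := by
  simp only [PySem.Set.add, PySem.Set.contains]
  split
  · rename_i h
    simp only [List.contains_eq_mem, decide_eq_true_eq] at h ⊢
    by_cases hyx : y = x
    · subst hyx; simp [h]
    · simp [hyx]
  · simp only [List.contains_eq_mem]
    by_cases hyx : y = x <;> simp [hyx]

theorem pvDf_filter (Q : List String) (p : String → Bool) :
    pvDf (Q.filter p) = (pvDf Q).filter p := by
  induction Q with
  | nil => rfl
  | cons x Q ih =>
    by_cases hp : p x = true
    · simp only [List.filter_cons, hp, if_true, pvDf, ih, List.filter_filter]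
      congr 1
      apply List.filter_congr
      intro y _
      exact Bool.and_comm _ _
    · simp only [List.filter_cons, hp, Bool.false_eq_true, if_false, pvDf, ih,
        List.filter_filter]
      apply List.filter_congr
      intro y _
      by_cases hyx : y = x
      · subst hyx; simp [Bool.eq_false_iff.mpr hp]
      · simp [hyx]

theorem pvDedup_df (P : List String) :
    ∀ (seen : PySem.Set String),
      (P.foldl pvDedupStep ([], seen)).1
        = pvDf (P.filter (fun x => !PySem.Set.contains seen x)) := by
  induction P with
  | nil => intro seen; rfl
  | cons ln P ih =>
    intro seen
    by_cases hc : PySem.Set.contains seen ln = true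
    · simp only [List.foldl_cons, pvDedupStep, hc, Bool.not_true, Bool.false_eq_true, if_false,
        List.filter_cons]
      rw [ih seen]
    · simp only [List.foldl_cons, pvDedupStep, Bool.eq_false_iff.mpr hc, Bool.not_false, if_true,
        List.nil_append, List.filter_cons, Bool.not_false]
      rw [pvDedup_passive P [ln], ih (PySem.Set.add seen ln)]
      have hfilt : P.filter (fun x => !PySem.Set.contains (PySem.Set.add seen ln) x)
          = (P.filter (fun x => !PySem.Set.contains seen x)).filter (fun y => !(y == ln)) := by
        rw [List.filter_filter]
        apply List.filter_congr
        intro y _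
        rw [pvContains_add]
        by_cases h1 : PySem.Set.contains seen y = true <;> by_cases h2 : (y == ln) = true <;>
          simp [h1, h2]
      rw [hfilt, pvDf_filter]
      simp [pvDf]

theorem pv_not_both (ln : String) (hb : pvIsBase ln = true) : pvIsPrefix ln = false := by
  by_cases h : pvIsPrefix ln = true
  · exfalso
    have h1 : PySem.Chars.startswith ln.toList "@base".toList = true := by
      simpa [pvIsBase] using hb
    have h2 : PySem.Chars.startswith ln.toList "@prefix".toList = true := by
      simpa [pvIsPrefix] using h
    have p1 := (PySem.Chars.startswith_iff _ _).mp h1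
    have p2 := (PySem.Chars.startswith_iff _ _).mp h2
    rcases List.prefix_or_prefix_of_prefix p1 p2 with hpp | hpp
    · exact absurd hpp (by decide)
    · exact absurd hpp (by decide)
  · exact Bool.eq_false_iff.mpr h

theorem pvRev_char (L : List String) :
    L.foldr (fun raw st => pvRevStep st raw) ([], [])
      = (pvDf ((pvLines L).filter pvIsPrefix),
         ((pvLines L).filter pvIsBody).reverse) := by
  induction L with
  | nil => simp [pvLines, pvDf]
  | cons raw L ih =>
    rw [List.foldr_cons, ih]
    simp only [pvRevStep]
    by_cases h0 : PySem.Str.strip raw = ""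
    · have hl : pvLines (raw :: L) = pvLines L := by simp [pvLines, h0]
      have h0' : (PySem.Str.strip raw == "") = true := by simpa using h0
      rw [if_pos h0', hl]
    · have hl : pvLines (raw :: L) = PySem.Str.strip raw :: pvLines L := by
        simp [pvLines, h0]
      have h0' : ¬ ((PySem.Str.strip raw == "") = true) := by simpa using h0
      simp only [if_neg h0', hl, List.filter_cons]
      by_cases hb : pvIsBase (PySem.Str.strip raw) = true
      · have hnp := pv_not_both _ hb
        have hnb : pvIsBody (PySem.Str.strip raw) = false := by
          simp only [pvIsBody, hb, Bool.true_or, Bool.not_true]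
        simp [if_pos hb, hnp, hnb]
      · simp only [if_neg hb]
        by_cases hp : pvIsPrefix (PySem.Str.strip raw) = true
        · have hnb : pvIsBody (PySem.Str.strip raw) = false := by
            simp only [pvIsBody, hp, Bool.true_or, Bool.or_true, Bool.not_true]
          simp [if_pos hp, hp, hnb, pvDf]
        · simp only [Bool.eq_false_iff.mpr hp, Bool.false_eq_true, if_false]
          by_cases ho : PySem.Str.isIn " a owl:Ontology" (PySem.Str.strip raw) = true
          · have hnb : pvIsBody (PySem.Str.strip raw) = false := by
              simp only [pvIsBody, ho, Bool.or_true, Bool.not_true]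
            simp only [PySem.Str.isIn, PySem.Str.strip, String.toList_ofList] at ho
            have ho' : PySem.Chars.isIn [' ', 'a', ' ', 'o', 'w', 'l', ':', 'O', 'n', 't', 'o', 'l', 'o', 'g', 'y'] (PySem.Chars.strip raw.toList) = true := ho
            simp [ho', hp, hnb]
          · have hnb : pvIsBody (PySem.Str.strip raw) = true := by
              simp only [pvIsBody, Bool.eq_false_iff.mpr hb, Bool.eq_false_iff.mpr hp,
                Bool.eq_false_iff.mpr ho, Bool.or_false, Bool.not_false]
            simp only [PySem.Str.isIn, PySem.Str.strip, String.toList_ofList] at ho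
            have ho' : ¬ PySem.Chars.isIn [' ', 'a', ' ', 'o', 'w', 'l', ':', 'O', 'n', 't', 'o', 'l', 'o', 'g', 'y'] (PySem.Chars.strip raw.toList) = true := ho
            simp [ho', hp, hnb]

-- ===== VERDICT (by name: the statement is the Claim_ definition above) =====
theorem add_ontology_header_spec : Claim_equal_add_ontology_header := by
  intro ttl_text base _
  unfold Spec_add_ontology_header
  have hfold : ((PySem.Str.splitlines ttl_text).reverse).foldl pvRevStep ([], [])
      = (PySem.Str.splitlines ttl_text).foldr (fun raw st => pvRevStep st raw) ([], []) :=
    List.foldl_reverse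
  have hA := pvDedup_passive ((pvLines (PySem.Str.splitlines ttl_text)).filter pvIsPrefix)
    ["@base <" ++ base ++ "> ."] PySem.Set.empty
  have hdf := pvDedup_df ((pvLines (PySem.Str.splitlines ttl_text)).filter pvIsPrefix)
    PySem.Set.empty
  have hnone : ((pvLines (PySem.Str.splitlines ttl_text)).filter pvIsPrefix).filter
      (fun x => !PySem.Set.contains PySem.Set.empty x)
      = (pvLines (PySem.Str.splitlines ttl_text)).filter pvIsPrefix := by
    simp [PySem.Set.contains, PySem.Set.empty]
  rw [hnone] at hdf
  simp only [add_ontology_header, add_ontology_header_alt, hfold, pvRev_char, hA, hdf]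
  simp
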